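-- pv_equiv track=rewrite | github.com/rkbrian/project_euler_100 | coding-draft/crazy_triangle.py | superTriangle
-- ===== SOURCE A (Python) =====
-- def superTriangle(row):
--         if row is None or len(row) == 0:
--                 return ""
--         elif len(row) == 1:
--                 return row[0]
--         stry = "RGB"
--         dicty = {'R':0, 'G':1, 'B':2}
--         goal = 0
--         k = 1
--         size = int(len(row))
--         if size % 2 == 0:
--                 for i in range(int(size / 2)):
--                         goal -= k * (dicty[row[i]] + dicty[row[size - 1 - i]])
--                         k = k * (size - 1 - i) // (i + 1)
--         else:
--                 for i in range(int(size / 2) + 1):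
--                         goal += k * dicty[row[i]]
--                         if i < int(size / 2):
--                                 goal += k * dicty[row[size - 1 - i]]
--                         k = k * (size - 1 - i) // (i + 1)
--         return stry[int(goal) % 3]
-- ===== SOURCE B (Python) =====
-- def superTriangle(row):
--     if row is None or len(row) == 0:
--         return ""
--     if len(row) == 1:
--         return row[0]
--     code = {'R': 0, 'G': 1, 'B': 2}
--     vals = [code[c] for c in row]
--     while len(vals) > 1:
--         vals = [(-(a + b)) % 3 for a, b in zip(vals, vals[1:])]
--     return "RGB"[vals[0]]
-- ===== Notes on version B (the rewrite author's own statement) =====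
-- stated objective: alternative
-- what changed: Replaces the signed binomial-coefficient accumulation (two mirrored index loops with an incrementally maintained C(n-1,i)) by the direct bottom-up triangle collapse: repeatedly map adjacent pairs (a,b) to (-(a+b)) % 3 until one value remains.
import Mathlib
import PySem

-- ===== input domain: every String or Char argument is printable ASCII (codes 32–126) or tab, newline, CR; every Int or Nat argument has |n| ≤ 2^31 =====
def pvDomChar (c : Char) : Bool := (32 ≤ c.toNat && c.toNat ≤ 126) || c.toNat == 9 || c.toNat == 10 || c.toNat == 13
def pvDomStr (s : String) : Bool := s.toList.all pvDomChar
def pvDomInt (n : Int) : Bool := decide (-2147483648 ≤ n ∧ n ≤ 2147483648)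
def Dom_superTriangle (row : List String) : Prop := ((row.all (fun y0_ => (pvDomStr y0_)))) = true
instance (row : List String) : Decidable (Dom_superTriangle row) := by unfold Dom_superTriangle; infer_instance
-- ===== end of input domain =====

-- B is an ALTERNATIVE algorithm: the bottom-up mod-3 triangle collapse instead of A's signed
-- binomial-coefficient accumulation; equivalence is proved on Pre_ (rows where Python A returns
-- instead of raising KeyError).

-- ===== PORT A =====
-- dicty = {'R':0, 'G':1, 'B':2}
def pvDict : PySem.Dict String Int := PySem.Dict.ofList [("R", 0), ("G", 1), ("B", 2)]

-- dicty[row[i]]; the default 0 stands exactly for the KeyError inputs excluded by Pre_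
def pvD (row : List String) (i : Nat) : Int := PySem.Dict.getD pvDict (row.getD i "") 0

def superTriangle (row : List String) : String :=
  if row.length = 0 then ""
  else if row.length = 1 then row.getD 0 ""
  else
    let stry := "RGB"
    let size := row.length
    let res : Int × Int :=
      if size % 2 = 0 then
        (List.range (size / 2)).foldl
          (fun (st : Int × Int) i =>
            (st.1 - st.2 * (pvD row i + pvD row (size - 1 - i)),
             PySem.Int.floordiv (st.2 * ((size : Int) - 1 - (i : Int))) ((i : Int) + 1)))
          (0, 1)
      else
        (List.range (size / 2 + 1)).foldl
          (fun (st : Int × Int) i =>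
            let g := st.1 + st.2 * pvD row i
            let g := if i < size / 2 then g + st.2 * pvD row (size - 1 - i) else g
            (g, PySem.Int.floordiv (st.2 * ((size : Int) - 1 - (i : Int))) ((i : Int) + 1)))
          (0, 1)
    (PySem.Str.pyGet? stry (PySem.Int.mod res.1 3)).elim "" (fun c => String.ofList [c])

-- ===== PORT B =====
-- one collapse step: [(-(a+b)) % 3 for a, b in zip(vals, vals[1:])]
def pvStep (vals : List Int) : List Int :=
  (vals.zip vals.tail).map (fun p => PySem.Int.mod (-(p.1 + p.2)) 3)

lemma pvStep_length (vals : List Int) : (pvStep vals).length = vals.length - 1 := by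
  simp [pvStep]

-- while len(vals) > 1: vals = step(vals)
def pvCollapse (vals : List Int) : List Int :=
  if _h : 1 < vals.length then pvCollapse (pvStep vals) else vals
termination_by vals.length
decreasing_by simp only [pvStep_length]; omega

def superTriangle_alt (row : List String) : String :=
  if row.length = 0 then ""
  else if row.length = 1 then row.getD 0 ""
  else
    let vals := row.map (fun c => PySem.Dict.getD pvDict c 0)
    let final := pvCollapse vals
    (PySem.Str.pyGet? "RGB" (final.getD 0 0)).elim "" (fun c => String.ofList [c])

-- ===== PRECONDITION & SPEC =====
-- Pre_ excludes exactly the rows of length ≥ 2 containing a string other than "R"/"G"/"B":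
-- there Python A (and Python B) raises KeyError.
def Pre_superTriangle (row : List String) : Prop :=
  row.length ≤ 1 ∨ ∀ s ∈ row, s = "R" ∨ s = "G" ∨ s = "B"
instance (row : List String) : Decidable (Pre_superTriangle row) := by
  unfold Pre_superTriangle; infer_instance

def pvWitness_superTriangle : List String := ["R", "G", "B", "B"]

def Spec_superTriangle (row : List String) (out : String) : Prop := out = superTriangle_alt row
instance (row : List String) (out : String) : Decidable (Spec_superTriangle row out) := by
  unfold Spec_superTriangle; infer_instance

-- ===== CLAIM (what is proved, stated in full; the proofs are below) =====
def Claim_equal_superTriangle : Prop :=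
  ∀ (row : List String), Dom_superTriangle row → Pre_superTriangle row →
    Spec_superTriangle row (superTriangle row)

-- ===== LEMMAS AND PROOFS =====

-- the value both programs compute mod 3: the binomial transform of the encoded row
def pvT (l : List Int) : ZMod 3 :=
  ∑ i ∈ Finset.range l.length,
    (Nat.choose (l.length - 1) i : ZMod 3) * ((l.getD i 0 : Int) : ZMod 3)

lemma pv_cast_mod3 (g : Int) : ((PySem.Int.mod g 3 : Int) : ZMod 3) = (g : ZMod 3) := by
  rw [PySem.Int.mod_eq_emod_of_pos (by norm_num)]
  exact_mod_cast ZMod.intCast_mod g 3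

lemma pv_int_eq_of_cast (a b : Int) (h1 : 0 ≤ a) (h2 : a < 3) (h3 : 0 ≤ b) (h4 : b < 3)
    (h : (a : ZMod 3) = (b : ZMod 3)) : a = b := by
  have := (ZMod.intCast_eq_intCast_iff' a b 3).mp h
  simp only [Nat.cast_ofNat] at this
  rwa [Int.emod_eq_of_lt h1 h2, Int.emod_eq_of_lt h3 h4] at this

-- Pascal rearrangement of the adjacent-pair sum
lemma pv_pascal (f : Nat → ZMod 3) (m : Nat) :
    ∑ i ∈ Finset.range (m+1), (Nat.choose m i : ZMod 3) * (f i + f (i+1))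
      = ∑ i ∈ Finset.range (m+2), (Nat.choose (m+1) i : ZMod 3) * f i := by
  have h1 : ∑ i ∈ Finset.range (m+1), (Nat.choose m (i+1) : ZMod 3) * f (i+1)
      = ∑ i ∈ Finset.range (m+1), (Nat.choose m i : ZMod 3) * f i - f 0 := by
    have := Finset.sum_range_succ' (fun i => (Nat.choose m i : ZMod 3) * f i) (m+1)
    have h2 : ∑ i ∈ Finset.range (m+2), (Nat.choose m i : ZMod 3) * f i
        = ∑ i ∈ Finset.range (m+1), (Nat.choose m i : ZMod 3) * f i := by
      rw [Finset.sum_range_succ, Nat.choose_succ_self]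
      simp
    rw [h2] at this
    simp only [Nat.choose_zero_right, Nat.cast_one, one_mul] at this
    exact eq_sub_of_add_eq this.symm
  rw [Finset.sum_range_succ' (fun i => (Nat.choose (m+1) i : ZMod 3) * f i) (m+1)]
  simp only [Nat.choose_succ_succ, Nat.cast_add, Nat.choose_zero_right, Nat.cast_one, one_mul]
  rw [Finset.sum_congr rfl (fun i _ => by ring :
    ∀ i ∈ Finset.range (m+1), ((Nat.choose m i : ZMod 3) + (Nat.choose m (i+1) : ZMod 3)) * f (i+1)
      = (Nat.choose m i : ZMod 3) * f (i+1) + (Nat.choose m (i+1) : ZMod 3) * f (i+1))]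
  rw [Finset.sum_add_distrib, h1]
  rw [Finset.sum_congr rfl (fun i _ => by ring :
    ∀ i ∈ Finset.range (m+1), (Nat.choose m i : ZMod 3) * (f i + f (i+1))
      = (Nat.choose m i : ZMod 3) * f i + (Nat.choose m i : ZMod 3) * f (i+1))]
  rw [Finset.sum_add_distrib]
  ring

lemma pvStep_getD (l : List Int) (i : Nat) (h : i + 1 < l.length) :
    (pvStep l).getD i 0 = PySem.Int.mod (-(l.getD i 0 + l.getD (i+1) 0)) 3 := by
  have hm : i < (pvStep l).length := by simp [pvStep]; omega
  rw [List.getD_eq_getElem _ _ hm, List.getD_eq_getElem _ _ (by omega), List.getD_eq_getElem _ _ h]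
  simp [pvStep, List.getElem_zip, List.getElem_tail]

lemma pvStep_T (l : List Int) (h : 2 ≤ l.length) :
    (-1 : ZMod 3) ^ ((pvStep l).length - 1) * pvT (pvStep l)
      = (-1 : ZMod 3) ^ (l.length - 1) * pvT l := by
  obtain ⟨m, hn⟩ : ∃ m, l.length = m + 2 := ⟨l.length - 2, by omega⟩
  have hlen : (pvStep l).length = m + 1 := by rw [pvStep_length]; omega
  have hT : pvT (pvStep l) = -(pvT l) := by
    unfold pvT
    rw [hlen, hn, show m + 1 - 1 = m from rfl, show m + 2 - 1 = m + 1 from rfl,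
        ← pv_pascal (fun i => ((l.getD i 0 : Int) : ZMod 3)) m, ← Finset.sum_neg_distrib]
    refine Finset.sum_congr rfl fun i hi => ?_
    have hi' := Finset.mem_range.mp hi
    rw [pvStep_getD l i (by omega), pv_cast_mod3]
    push_cast
    ring
  rw [hT, hlen, hn, show m + 1 - 1 = m from rfl, show m + 2 - 1 = m + 1 from rfl, pow_succ]
  ring

lemma pvCollapse_spec (l : List Int) (h : 2 ≤ l.length) :
    ∃ w : Int, pvCollapse l = [w] ∧ 0 ≤ w ∧ w < 3 ∧
      (w : ZMod 3) = (-1 : ZMod 3) ^ (l.length - 1) * pvT l := by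
  suffices main : ∀ n (l : List Int), l.length = n → 2 ≤ l.length →
      ∃ w : Int, pvCollapse l = [w] ∧ 0 ≤ w ∧ w < 3 ∧
        (w : ZMod 3) = (-1 : ZMod 3) ^ (l.length - 1) * pvT l from main _ l rfl h
  intro n
  induction n using Nat.strong_induction_on with
  | _ n ih =>
    intro l hln h
    rw [pvCollapse, dif_pos (by omega)]
    rcases eq_or_lt_of_le h with h2 | h3
    · -- base: length 2, one step then stop
      have hl2 : l.length = 2 := h2.symm
      have hsl : (pvStep l).length = 1 := by rw [pvStep_length]; omega
      obtain ⟨w, hw⟩ := List.length_eq_one_iff.mp hsl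
      have hmod : w = PySem.Int.mod (-(l.getD 0 0 + l.getD 1 0)) 3 := by
        have : (pvStep l).getD 0 0 = w := by rw [hw]; rfl
        rw [← this, pvStep_getD l 0 (by omega)]
      refine ⟨w, ?_, ?_, ?_, ?_⟩
      · rw [pvCollapse, dif_neg (by omega)]
        exact hw
      · rw [hmod]; exact PySem.Int.mod_nonneg _ (by norm_num)
      · rw [hmod]; exact PySem.Int.mod_lt _ (by norm_num)
      · rw [hmod, pv_cast_mod3]
        unfold pvT
        rw [hl2]
        simp [Finset.sum_range_succ]
    · -- step: recurse on the collapsed list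
      have hsl2 : 2 ≤ (pvStep l).length := by rw [pvStep_length]; omega
      obtain ⟨w, hw, hw0, hw3, hwc⟩ :=
        ih (n-1) (by omega) (pvStep l) (by rw [pvStep_length]; omega) hsl2
      exact ⟨w, hw, hw0, hw3, by rw [hwc]; exact pvStep_T l h⟩

-- A-side: the incrementally maintained k is C(n-1, i); its integer-division update is exact
lemma pv_k_step (n i : Nat) (h1 : 1 ≤ n) :
    PySem.Int.floordiv ((Nat.choose (n-1) i : Int) * ((n:Int) - 1 - (i:Int))) ((i:Int)+1)
      = (Nat.choose (n-1) (i+1) : Int) := by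
  rcases Nat.lt_or_ge i (n-1) with hi | hi
  · have hcast : ((n:Int) - 1 - (i:Int)) = ((n - 1 - i : Nat) : Int) := by omega
    rw [hcast, ← Nat.cast_mul, show ((i:Int)+1) = ((i+1 : Nat) : Int) by push_cast; ring,
        PySem.Int.floordiv_natCast, ← Nat.choose_succ_right_eq, Nat.mul_div_cancel _ (by omega)]
  · rcases eq_or_lt_of_le hi with hi2 | hi2
    · have h0 : ((n:Int) - 1 - (i:Int)) = 0 := by omega
      rw [h0, mul_zero, Nat.choose_eq_zero_of_lt (by omega),
          PySem.Int.floordiv_eq_ediv_of_pos (by omega : (0:Int) < (i:Int)+1)]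
      simp
    · rw [Nat.choose_eq_zero_of_lt (by omega), Nat.choose_eq_zero_of_lt (by omega)]
      simp

-- A's loop in closed form (for any per-index increment e)
lemma pvA_loop (n : Nat) (e : Nat → Int) (hn : 1 ≤ n) (t : Nat) :
    (List.range t).foldl (fun (st : Int × Int) i =>
        (st.1 + st.2 * e i, PySem.Int.floordiv (st.2 * ((n:Int) - 1 - (i:Int))) ((i:Int)+1))) (0,1)
      = (∑ i ∈ Finset.range t, (Nat.choose (n-1) i : Int) * e i, (Nat.choose (n-1) t : Int)) := by
  induction t with
  | zero => simp
  | succ t ih =>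
    rw [List.range_succ, List.foldl_append, ih]
    simp only [List.foldl_cons, List.foldl_nil, Finset.sum_range_succ]
    refine Prod.ext ?_ ?_
    · simp
    · simpa using pv_k_step n t hn

lemma pv_sum_even (F : Nat → ZMod 3) (h : Nat) :
    ∑ i ∈ Finset.range (2*h), F i = ∑ i ∈ Finset.range h, (F i + F (2*h-1-i)) := by
  rw [two_mul, Finset.sum_range_add, ← Finset.sum_range_reflect (fun j => F (h + j)) h,
      ← Finset.sum_add_distrib]
  refine Finset.sum_congr rfl fun i hi => ?_
  have := Finset.mem_range.mp hi
  congr 2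
  omega

lemma pv_sum_odd (F : Nat → ZMod 3) (h : Nat) :
    ∑ i ∈ Finset.range (2*h+1), F i
      = (∑ i ∈ Finset.range (h+1), F i) + ∑ i ∈ Finset.range h, F (2*h-i) := by
  rw [show 2*h+1 = (h+1) + h by ring, Finset.sum_range_add,
      ← Finset.sum_range_reflect (fun j => F (h + 1 + j)) h]
  congr 1
  refine Finset.sum_congr rfl fun i hi => ?_
  have := Finset.mem_range.mp hi
  congr 1
  omega

lemma pv_d_map (row : List String) (i : Nat) :
    ((pvD row i : Int) : ZMod 3)
      = (((row.map (fun c => PySem.Dict.getD pvDict c 0)).getD i 0 : Int) : ZMod 3) := by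
  by_cases h : i < row.length
  · rw [pvD, List.getD_eq_getElem row _ h,
        List.getD_eq_getElem (row.map fun c => PySem.Dict.getD pvDict c 0) _ (by simpa),
        List.getElem_map]
  · rw [pvD, List.getD_eq_default _ _ (by omega), List.getD_eq_default _ _ (by simpa using by omega)]
    rfl

-- abbreviation for the encoded entries, seen in ZMod 3
lemma pv_even_sum (l : List Int) (h : Nat) (hl : l.length = 2*h) :
    ∑ i ∈ Finset.range h, (Nat.choose (l.length-1) i : ZMod 3) *
        (((l.getD i 0 : Int) : ZMod 3) + ((l.getD (l.length-1-i) 0 : Int) : ZMod 3))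
      = pvT l := by
  unfold pvT
  rw [hl, pv_sum_even (fun i => (Nat.choose (2*h-1) i : ZMod 3) * ((l.getD i 0 : Int) : ZMod 3)) h]
  refine Finset.sum_congr rfl fun i hi => ?_
  have hi' := Finset.mem_range.mp hi
  rw [mul_add]
  congr 1
  rw [show 2*h-1-i = (2*h-1) - i from rfl, Nat.choose_symm (by omega)]

lemma pv_odd_sum (l : List Int) (h : Nat) (hl : l.length = 2*h+1) :
    (∑ i ∈ Finset.range (h+1), (Nat.choose (l.length-1) i : ZMod 3) * ((l.getD i 0 : Int) : ZMod 3))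
      + ∑ i ∈ Finset.range h, (Nat.choose (l.length-1) i : ZMod 3) * ((l.getD (l.length-1-i) 0 : Int) : ZMod 3)
      = pvT l := by
  unfold pvT
  rw [hl, show 2*h+1-1 = 2*h from rfl,
      pv_sum_odd (fun i => (Nat.choose (2*h) i : ZMod 3) * ((l.getD i 0 : Int) : ZMod 3)) h]
  congr 1
  refine Finset.sum_congr rfl fun i hi => ?_
  have hi' := Finset.mem_range.mp hi
  rw [Nat.choose_symm (show i ≤ 2*h by omega)]

lemma pv_final (x w : Int) (hx : 0 ≤ x) (hx3 : x < 3) (hw0 : 0 ≤ w) (hw3 : w < 3)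
    (hc : (x : ZMod 3) = (w : ZMod 3)) :
    (PySem.Str.pyGet? "RGB" x).elim "" (fun c => String.ofList [c])
      = (PySem.Str.pyGet? "RGB" w).elim "" (fun c => String.ofList [c]) := by
  rw [pv_int_eq_of_cast x w hx hx3 hw0 hw3 hc]

-- ===== VERDICT (by name: the statement is the Claim_ definition above) =====
theorem superTriangle_spec : Claim_equal_superTriangle := by
  unfold Claim_equal_superTriangle
  intro row _ _
  unfold Spec_superTriangle
  by_cases h0 : row.length = 0
  · simp [superTriangle, superTriangle_alt, h0]
  by_cases h1 : row.length = 1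
  · simp [superTriangle, superTriangle_alt, h1]
  have hn2 : 2 ≤ row.length := by omega
  set l : List Int := row.map (fun c => PySem.Dict.getD pvDict c 0) with hl
  have hll : l.length = row.length := by simp [hl]
  obtain ⟨w, hw, hw0, hw3, hwc⟩ := pvCollapse_spec l (by omega)
  have halt : superTriangle_alt row
      = (PySem.Str.pyGet? "RGB" w).elim "" (fun c => String.ofList [c]) := by
    simp only [superTriangle_alt, if_neg h0, if_neg h1]
    rw [← hl, hw]
    rfl
  rw [halt]
  simp only [superTriangle, if_neg h0, if_neg h1]
  by_cases hpar : row.length % 2 = 0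
  · -- even length
    obtain ⟨k, hk⟩ : ∃ k, row.length = 2*k := ⟨row.length/2, by omega⟩
    rw [if_pos hpar]
    have hfun : (fun (st : Int × Int) i =>
        (st.1 - st.2 * (pvD row i + pvD row (row.length - 1 - i)),
         PySem.Int.floordiv (st.2 * ((row.length : Int) - 1 - (i : Int))) ((i : Int) + 1)))
      = (fun (st : Int × Int) i =>
        (st.1 + st.2 * (-(pvD row i + pvD row (row.length - 1 - i))),
         PySem.Int.floordiv (st.2 * ((row.length : Int) - 1 - (i : Int))) ((i : Int) + 1))) := by
      funext st i
      refine Prod.ext ?_ rfl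
      dsimp only
      ring
    rw [hfun, pvA_loop row.length _ (by omega)]
    refine pv_final _ w (PySem.Int.mod_nonneg _ (by norm_num))
      (PySem.Int.mod_lt _ (by norm_num)) hw0 hw3 ?_
    rw [pv_cast_mod3, hwc, hll]
    push_cast
    simp only [pv_d_map, ← hl]
    have hkk : row.length / 2 = k := by omega
    have hsign : ((-1 : ZMod 3)) ^ (row.length - 1) = -1 :=
      Odd.neg_one_pow ⟨k - 1, by omega⟩
    rw [hsign, hkk, ← hll, neg_one_mul, ← pv_even_sum l k (by omega), ← Finset.sum_neg_distrib]
    refine Finset.sum_congr rfl fun i hi => ?_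
    ring
  · -- odd length
    obtain ⟨k, hk⟩ : ∃ k, row.length = 2*k + 1 := ⟨row.length/2, by omega⟩
    have hkk : row.length / 2 = k := by omega
    rw [if_neg hpar]
    have hfun : (fun (st : Int × Int) i =>
        (let g := st.1 + st.2 * pvD row i;
         let g := if i < row.length / 2 then g + st.2 * pvD row (row.length - 1 - i) else g;
         (g, PySem.Int.floordiv (st.2 * ((row.length : Int) - 1 - (i : Int))) ((i : Int) + 1))))
      = (fun (st : Int × Int) i =>
        (st.1 + st.2 * (pvD row i + if i < row.length / 2 then pvD row (row.length - 1 - i) else 0),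
         PySem.Int.floordiv (st.2 * ((row.length : Int) - 1 - (i : Int))) ((i : Int) + 1))) := by
      funext st i
      refine Prod.ext ?_ rfl
      dsimp only
      split_ifs with hc <;> ring
    rw [hfun, pvA_loop row.length _ (by omega)]
    refine pv_final _ w (PySem.Int.mod_nonneg _ (by norm_num))
      (PySem.Int.mod_lt _ (by norm_num)) hw0 hw3 ?_
    have hsplit : ∑ i ∈ Finset.range (row.length/2 + 1), (Nat.choose (row.length - 1) i : Int) *
          (pvD row i + if i < row.length / 2 then pvD row (row.length - 1 - i) else 0)
        = (∑ i ∈ Finset.range (row.length/2 + 1), (Nat.choose (row.length - 1) i : Int) * pvD row i)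
          + ∑ i ∈ Finset.range (row.length/2), (Nat.choose (row.length - 1) i : Int) *
              pvD row (row.length - 1 - i) := by
      rw [Finset.sum_congr rfl (fun i _ => by split_ifs <;> ring :
        ∀ i ∈ Finset.range (row.length/2 + 1), (Nat.choose (row.length - 1) i : Int) *
            (pvD row i + if i < row.length / 2 then pvD row (row.length - 1 - i) else 0)
          = (Nat.choose (row.length - 1) i : Int) * pvD row i
            + (if i < row.length / 2 then (Nat.choose (row.length - 1) i : Int) *
                pvD row (row.length - 1 - i) else 0)),
        Finset.sum_add_distrib]
      congr 1
      rw [Finset.sum_range_succ, if_neg (lt_irrefl _), add_zero]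
      exact Finset.sum_congr rfl fun i hi => if_pos (Finset.mem_range.mp hi)
    rw [hsplit, pv_cast_mod3, hwc, hll]
    push_cast
    simp only [pv_d_map, ← hl]
    have hsign : ((-1 : ZMod 3)) ^ (row.length - 1) = 1 :=
      Even.neg_one_pow ⟨k, by omega⟩
    rw [hsign, hkk, one_mul, ← hll, ← pv_odd_sum l k (by omega)]
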